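-- pv_equiv track=rewrite | github.com/0f11/Python | pr14_exam/exam.py | remove_lowest_digit
-- ===== SOURCE A (Python) =====
-- def remove_lowest_digit(number):
--     """
--     Given a non-negative integer, remove the first occurrence of the lowest digit and return a new number.
--
--     123 => 23
--     223 => 23
--     232 => 32
--     1 => 0
--     :param number: non-negative integer
--     :return: non-negative integer
--        assert remove_lowest_digit(123) == 23
--     assert remove_lowest_digit(100) == 10
--     assert remove_lowest_digit(7) == 0
--     assert remove_lowest_digit(171) == 71
--     """
--     numbers_list = []
--     numbers = str(number)
--     for i in numbers:
--         numbers_list.append(i)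
--     if len(numbers_list) == 1:
--         return 0
--     numbers_list_2 = sorted(numbers_list)
--     numbers_list.remove(numbers_list_2[0])
--     return int("".join(numbers_list))
-- ===== SOURCE B (Python) =====
-- def rec(c, rest):
--     # for the nonempty string c + rest, return a pair:
--     # (its lowest character, the string with the first occurrence of that character removed)
--     if not rest:
--         return c, ""
--     m, t = rec(rest[0], rest[1:])
--     if c <= m:
--         return c, rest
--     return m, c + t
--
--
-- def remove_lowest_digit(number):
--     s = str(number)
--     if len(s) == 1:
--         return 0
--     _, out = rec(s[0], s[1:])
--     return int(out)
-- ===== Notes on version B (the rewrite author's own statement) =====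
-- stated objective: alternative
-- what changed: B replaces A's build-a-char-list loop + full sort + list.remove + join pipeline by one recursive pass over the string that returns a pair (running minimum, string with the first occurrence of that minimum already removed), so no sorted copy, no min/index/remove call and no second traversal exist.
import Mathlib
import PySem

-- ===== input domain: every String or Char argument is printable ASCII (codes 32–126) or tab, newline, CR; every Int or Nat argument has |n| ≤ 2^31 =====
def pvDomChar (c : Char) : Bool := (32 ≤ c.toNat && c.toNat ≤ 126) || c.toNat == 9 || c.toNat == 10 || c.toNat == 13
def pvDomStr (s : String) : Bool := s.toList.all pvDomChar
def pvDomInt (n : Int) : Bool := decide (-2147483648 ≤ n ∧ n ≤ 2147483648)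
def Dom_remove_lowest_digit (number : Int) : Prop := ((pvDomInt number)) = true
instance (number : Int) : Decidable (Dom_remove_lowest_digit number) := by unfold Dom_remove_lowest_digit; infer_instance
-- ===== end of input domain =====

-- B replaces A's char-list build loop / full sort / list.remove / join pipeline by one
-- recursive pass returning (lowest char, string with its first occurrence removed) (objective: alternative).

-- ===== PORT A =====
def remove_lowest_digit (number : Int) : Int :=
  let numbers := PySem.Int.toChars number
  let numbers_list := numbers.foldl (fun acc i => acc ++ [i]) []
  if numbers_list.length = 1 then 0
  else
    let numbers_list_2 := PySem.List.sorted numbers_list (fun c => c) false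
    -- numbers_list_2[0]: str(number) is never empty, so the index never raises
    match PySem.List.pyGet? numbers_list_2 0 with
    | none => 0
    | some low =>
      -- list.remove: low is a member of numbers_list (sorted is a permutation), never raises
      match PySem.List.remove? numbers_list low with
      | none => 0
      | some rest =>
        -- int("".join(...)): the remaining characters always form a decimal literal, never raises
        (PySem.Int.ofChars? rest).getD 0

-- ===== PORT B =====
-- rec(c, rest): (lowest char of c+rest, c+rest with the first occurrence of that char removed)
def rldRec : Char → List Char → Char × List Char
  | c, [] => (c, [])
  | c, d :: t =>
    let p := rldRec d t
    if c ≤ p.1 then (c, d :: t) else (p.1, c :: p.2)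

def remove_lowest_digit_alt (number : Int) : Int :=
  let s := PySem.Int.toChars number
  if s.length = 1 then 0
  else
    match s with
    | [] => 0            -- str(number) is never empty, so s[0] / s[1:] never raise
    | c :: t =>
      -- int(out): the remaining characters always form a decimal literal, never raises
      (PySem.Int.ofChars? (rldRec c t).2).getD 0

-- ===== PRECONDITION & SPEC =====
def Spec_remove_lowest_digit (number : Int) (out : Int) : Prop := out = remove_lowest_digit_alt number
instance (number : Int) (out : Int) : Decidable (Spec_remove_lowest_digit number out) := by unfold Spec_remove_lowest_digit; infer_instance

-- ===== CLAIM (what is proved, stated in full; the proofs are below) =====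
def Claim_equal_remove_lowest_digit : Prop := ∀ (number : Int), Dom_remove_lowest_digit number → Spec_remove_lowest_digit number (remove_lowest_digit number)

-- ===== LEMMAS AND PROOFS =====

-- foldl min distributes over min (used to read off rldRec's first component)
theorem foldl_min_min (t : List Char) (a b : Char) :
    t.foldl min (min a b) = min a (t.foldl min b) := by
  induction t generalizing b with
  | nil => rfl
  | cons x t ih => rw [List.foldl_cons, List.foldl_cons, min_assoc, ih]

-- the first component of rldRec is the running minimum of the characters
theorem rldRec_fst (c : Char) (t : List Char) : (rldRec c t).1 = t.foldl min c := by
  induction t generalizing c with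
  | nil => rfl
  | cons d t ih =>
    rw [List.foldl_cons, foldl_min_min t c d]
    by_cases h : c ≤ (rldRec d t).1
    · simp only [rldRec, if_pos h]
      exact (min_eq_left (le_of_le_of_eq h (ih d))).symm
    · simp only [rldRec, if_neg h]
      rw [ih d]
      exact (min_eq_right (le_of_lt (lt_of_le_of_lt (le_of_eq (ih d).symm) (lt_of_not_ge h)))).symm

-- the second component of rldRec = erasing the first occurrence of that minimum
theorem rldRec_snd (c : Char) (t : List Char) :
    (rldRec c t).2 = (c :: t).erase (rldRec c t).1 := by
  induction t generalizing c with
  | nil => simp [rldRec]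
  | cons d t ih =>
    by_cases h : c ≤ (rldRec d t).1
    · simp [rldRec, if_pos h]
    · have hne : (c == (rldRec d t).1) = false := by
        simp only [beq_eq_false_iff_ne, ne_eq]
        intro he
        exact h (le_of_eq he)
      simp only [rldRec, if_neg h]
      rw [List.erase_cons, if_neg (by simp [hne]), ← ih d]

-- head of Python's sorted list = the first minimum (both are the least value)
theorem sorted_head_eq_min {cs : List Char} {h m : Char} {t : List Char}
    (hs : PySem.List.sorted cs (fun c => c) false = h :: t)
    (hm : PySem.List.min? cs (fun c => c) = some m) : h = m := by
  have hperm := PySem.List.sorted_perm cs (fun c => c) false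
  rw [hs] at hperm
  have hmem : h ∈ cs := hperm.mem_iff.mp (List.mem_cons_self)
  have hpair := PySem.List.sorted_pairwise cs (fun c => c)
  rw [hs] at hpair
  have hle : ∀ y ∈ cs, h ≤ y := by
    intro y hy
    rcases List.mem_cons.mp (hperm.mem_iff.mpr hy) with h1 | h1
    · exact le_of_eq h1.symm
    · exact (List.pairwise_cons.mp hpair).1 y h1
  exact le_antisymm (hle m (PySem.List.min?_mem hm)) (PySem.List.min?_isMin hm h hmem)

-- ===== VERDICT (by name: the statement is the Claim_ definition above) =====
theorem remove_lowest_digit_spec : Claim_equal_remove_lowest_digit := by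
  intro number _
  unfold Spec_remove_lowest_digit remove_lowest_digit remove_lowest_digit_alt
  simp only [PySem.List.foldl_append_singleton_eq_self, List.nil_append]
  set cs := PySem.Int.toChars number with hcs
  by_cases hlen : cs.length = 1
  · simp [hlen]
  · simp only [hlen, if_false]
    match cs with
    | [] => simp [PySem.List.pyGet?, PySem.List.sorted]
    | c :: t =>
      have hm : PySem.List.min? (c :: t) (fun y => y) = some (t.foldl min c) :=
        PySem.List.min?_id_cons c t
      obtain ⟨h, t', hs⟩ : ∃ h t', PySem.List.sorted (c :: t) (fun y => y) false = h :: t' := by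
        cases hss : PySem.List.sorted (c :: t) (fun y => y) false with
        | nil => exact absurd ((PySem.List.sorted_eq_nil_iff (c :: t) _ _).mp hss) (by simp)
        | cons a b => exact ⟨a, b, rfl⟩
      have hhm : h = t.foldl min c := sorted_head_eq_min hs hm
      have hget : PySem.List.pyGet? (PySem.List.sorted (c :: t) (fun y => y) false) 0 = some h := by
        rw [hs]; simp [PySem.List.pyGet?, PySem.List.pyIdx?]
      have hmmem : t.foldl min c ∈ (c :: t) := by
        rcases PySem.List.foldl_min_mem t c with h1 | h1
        · rw [h1]; exact List.mem_cons_self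
        · exact List.mem_cons_of_mem _ h1
      have hrem : PySem.List.remove? (c :: t) (t.foldl min c) =
          some ((c :: t).erase (t.foldl min c)) :=
        PySem.List.remove?_eq_some_erase _ _ hmmem
      simp only [hget, hhm, hrem]
      rw [rldRec_snd c t, rldRec_fst c t]
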